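-- pv_equiv track=rewrite | github.com/ZachariasHultman/Stocks | utdelning_optimerad_bank.py | del_first_occurence
-- ===== SOURCE A (Python) =====
-- def del_first_occurence(stock_list,index):
--     stock_del=[]
--     flagsator=False
--     for i in stock_list:
--         if i['index']==index and flagsator==False:
--             flagsator=True
--             continue
--         stock_del.append(i)
--     return stock_del
-- ===== SOURCE B (Python) =====
-- def del_first_occurence(stock_list, index):
--     pos = next((k for k, d in enumerate(stock_list) if d['index'] == index), None)
--     if pos is None:
--         return list(stock_list)
--     return stock_list[:pos] + stock_list[pos + 1:]
-- ===== Notes on version B (the rewrite author's own statement) =====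
-- stated objective: simpler
-- what changed: Replaces the flagged per-element append loop by a find-the-position scan followed by slice concatenation.
import Mathlib
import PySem

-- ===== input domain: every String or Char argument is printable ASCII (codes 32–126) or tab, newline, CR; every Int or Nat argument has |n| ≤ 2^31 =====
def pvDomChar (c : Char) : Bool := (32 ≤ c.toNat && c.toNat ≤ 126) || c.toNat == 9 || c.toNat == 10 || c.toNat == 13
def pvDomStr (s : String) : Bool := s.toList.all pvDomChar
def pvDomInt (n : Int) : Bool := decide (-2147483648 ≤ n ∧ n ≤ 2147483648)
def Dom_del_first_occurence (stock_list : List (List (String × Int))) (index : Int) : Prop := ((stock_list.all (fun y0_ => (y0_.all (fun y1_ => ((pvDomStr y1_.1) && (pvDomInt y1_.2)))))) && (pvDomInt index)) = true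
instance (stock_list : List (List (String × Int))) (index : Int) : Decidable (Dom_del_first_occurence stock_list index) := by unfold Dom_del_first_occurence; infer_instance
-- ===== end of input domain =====

-- B removes the first element whose 'index' field equals `index` by locating its
-- position and concatenating the slices around it, instead of A's append loop with
-- a flag; objective: simpler. Equivalence is about the return value (neither mutates).

-- ===== PORT A =====
-- i['index'] : first-match lookup in the association list (dict convention);
-- Python raises KeyError when absent, so Pre_ requires the key in every element.
def pyIdxKey (d : List (String × Int)) : Option Int := d.lookup "index"

def del_first_occurence (stock_list : List (List (String × Int))) (index : Int) : List (List (String × Int)) :=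
  (stock_list.foldl
    (fun (st : List (List (String × Int)) × Bool) i =>
      if pyIdxKey i == some index && st.2 == false then (st.1, true)
      else (st.1 ++ [i], st.2))
    ([], false)).1

-- ===== PORT B =====
-- position of the first element with d['index'] == index (Python's next over enumerate)
def findPosIdx (stock_list : List (List (String × Int))) (index : Int) : Option Nat :=
  match stock_list with
  | [] => none
  | d :: rest =>
    if pyIdxKey d == some index then some 0
    else (findPosIdx rest index).map (· + 1)

def del_first_occurence_alt (stock_list : List (List (String × Int))) (index : Int) : List (List (String × Int)) :=
  match findPosIdx stock_list index with
  | none => stock_list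
  | some p => stock_list.take p ++ stock_list.drop (p + 1)

-- ===== PRECONDITION & SPEC =====
-- A looks up i['index'] on every element, so it raises KeyError iff any element lacks the key.
def Pre_del_first_occurence (stock_list : List (List (String × Int))) (index : Int) : Prop :=
  ∀ d ∈ stock_list, (pyIdxKey d).isSome
instance (stock_list : List (List (String × Int))) (index : Int) : Decidable (Pre_del_first_occurence stock_list index) := by unfold Pre_del_first_occurence; infer_instance

def pvWitness_del_first_occurence : (List (List (String × Int))) × Int :=
  ([[("index", 1)], [("index", 2)], [("index", 1)]], 1)

def Spec_del_first_occurence (stock_list : List (List (String × Int))) (index : Int) (out : List (List (String × Int))) : Prop := out = del_first_occurence_alt stock_list index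
instance (stock_list : List (List (String × Int))) (index : Int) (out : List (List (String × Int))) : Decidable (Spec_del_first_occurence stock_list index out) := by unfold Spec_del_first_occurence; infer_instance

-- ===== CLAIM (what is proved, stated in full; the proofs are below) =====
def Claim_equal_del_first_occurence : Prop := ∀ (stock_list : List (List (String × Int))) (index : Int), Dom_del_first_occurence stock_list index → Pre_del_first_occurence stock_list index → Spec_del_first_occurence stock_list index (del_first_occurence stock_list index)

-- ===== LEMMAS AND PROOFS =====

-- once the flag is true, A's loop appends the whole rest
lemma foldA_true (l : List (List (String × Int))) (index : Int)
    (acc : List (List (String × Int))) :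
    (l.foldl
      (fun (st : List (List (String × Int)) × Bool) i =>
        if pyIdxKey i == some index && st.2 == false then (st.1, true)
        else (st.1 ++ [i], st.2))
      (acc, true)) = (acc ++ l, true) := by
  induction l generalizing acc with
  | nil => simp
  | cons h t ih =>
    simp only [List.foldl]
    rw [if_neg (by simp), ih]
    simp


-- with the flag still false, A's loop computes acc ++ B's result
lemma foldA_false (l : List (List (String × Int))) (index : Int)
    (acc : List (List (String × Int))) :
    (l.foldl
      (fun (st : List (List (String × Int)) × Bool) i =>
        if pyIdxKey i == some index && st.2 == false then (st.1, true)
        else (st.1 ++ [i], st.2))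
      (acc, false)).1 = acc ++ del_first_occurence_alt l index := by
  induction l generalizing acc with
  | nil => simp [del_first_occurence_alt, findPosIdx]
  | cons h t ih =>
    by_cases hm : pyIdxKey h == some index
    · simp only [List.foldl]
      rw [if_pos (by simp [hm]), foldA_true]
      simp [del_first_occurence_alt, findPosIdx, hm]
    · simp only [List.foldl]
      rw [if_neg (by simp [hm]), ih]
      simp [del_first_occurence_alt, findPosIdx, hm]
      cases hp : findPosIdx t index with
      | none => simp
      | some p => simp [List.take]

-- ===== VERDICT (by name: the statement is the Claim_ definition above) =====
theorem del_first_occurence_spec : Claim_equal_del_first_occurence := by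
  intro stock_list index _ _
  unfold Spec_del_first_occurence del_first_occurence
  simpa using foldA_false stock_list index []
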